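-- pv_equiv track=rewrite | github.com/nestortada/BigDataProyecto | Code/Operationalization/analisis_descriptivo_secop.py | select_priority_columns
-- ===== SOURCE A (Python) =====
-- def select_priority_columns(available_columns: list[str], priority_columns: list[str], max_count: int) -> list[str]:
--     ordered_columns: list[str] = []
--
--     for column in priority_columns:
--         if column in available_columns and column not in ordered_columns:
--             ordered_columns.append(column)
--
--     for column in available_columns:
--         if column not in ordered_columns:
--             ordered_columns.append(column)
--
--     return ordered_columns[:max_count]
-- ===== SOURCE B (Python) =====
-- def select_priority_columns(available_columns: list[str], priority_columns: list[str], max_count: int) -> list[str]: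
--     big = len(priority_columns)
--     distinct = list(dict.fromkeys(available_columns))
--     distinct.sort(key=lambda c: priority_columns.index(c) if c in priority_columns else big)
--     return distinct[:max_count]
-- ===== Notes on version B (the rewrite author's own statement) =====
-- stated objective: alternative
-- what changed: Replaces A's two sequential filtering loops with a dedup of the available columns followed by one stable sort keyed by first index in priority_columns (absent columns keyed past the end), relying on sort stability for the tie order.
import Mathlib
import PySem

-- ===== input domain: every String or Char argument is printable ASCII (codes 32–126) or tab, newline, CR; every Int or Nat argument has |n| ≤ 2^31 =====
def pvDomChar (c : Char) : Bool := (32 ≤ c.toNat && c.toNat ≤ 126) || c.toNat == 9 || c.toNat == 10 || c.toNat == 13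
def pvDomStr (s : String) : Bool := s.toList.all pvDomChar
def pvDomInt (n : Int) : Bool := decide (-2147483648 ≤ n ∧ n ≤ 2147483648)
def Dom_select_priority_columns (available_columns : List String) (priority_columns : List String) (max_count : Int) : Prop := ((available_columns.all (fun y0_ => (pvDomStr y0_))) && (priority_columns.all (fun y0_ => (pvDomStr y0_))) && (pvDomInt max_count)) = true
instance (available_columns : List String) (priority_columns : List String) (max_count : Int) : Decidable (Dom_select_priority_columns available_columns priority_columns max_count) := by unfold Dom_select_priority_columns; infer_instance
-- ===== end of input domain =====

-- B replaces A's two quadratic filtering loops by: dedup the available columns once,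
-- then stable-sort them by first-priority-index (alternative algorithm, same result).


-- ===== PORT A =====
def select_priority_columns (available_columns : List String) (priority_columns : List String) (max_count : Int) : List String :=
  let ordered1 := priority_columns.foldl
    (fun ordered column =>
      if column ∈ available_columns ∧ column ∉ ordered then ordered ++ [column] else ordered) []
  let ordered2 := available_columns.foldl
    (fun ordered column => if column ∉ ordered then ordered ++ [column] else ordered) ordered1
  PySem.List.slice ordered2 none (some max_count)

-- ===== PORT B =====
-- B's sort key: 'priority_columns.index(c) if c in priority_columns else big' (big = len(priority_columns))
def pvKey (priority_columns : List String) (c : String) : Int :=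
  if c ∈ priority_columns then (((PySem.List.index? priority_columns c).getD 0 : Nat) : Int)
  else (priority_columns.length : Int)

def select_priority_columns_alt (available_columns : List String) (priority_columns : List String) (max_count : Int) : List String :=
  let distinct := PySem.List.dedup available_columns
  let sortedD := PySem.List.sorted distinct (pvKey priority_columns)
  PySem.List.slice sortedD none (some max_count)

-- ===== PRECONDITION & SPEC =====
def Spec_select_priority_columns (available_columns : List String) (priority_columns : List String) (max_count : Int) (out : List String) : Prop := out = select_priority_columns_alt available_columns priority_columns max_count
instance (available_columns : List String) (priority_columns : List String) (max_count : Int) (out : List String) : Decidable (Spec_select_priority_columns available_columns priority_columns max_count out) := by unfold Spec_select_priority_columns; infer_instance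

-- ===== CLAIM (what is proved, stated in full; the proofs are below) =====
def Claim_equal_select_priority_columns : Prop := ∀ (available_columns : List String) (priority_columns : List String) (max_count : Int), Dom_select_priority_columns available_columns priority_columns max_count → Spec_select_priority_columns available_columns priority_columns max_count (select_priority_columns available_columns priority_columns max_count)

-- ===== LEMMAS AND PROOFS =====

-- index? of a member is some i with i < length
theorem pvIndex_some {l : List String} {v : String} (h : v ∈ l) :
    ∃ i, PySem.List.index? l v = some i ∧ i < l.length := by
  cases hio : PySem.List.index? l v with
  | none =>
      rw [PySem.List.index?_eq_idxOf?] at hio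
      exact absurd h (List.idxOf?_eq_none_iff.mp hio)
  | some i =>
      obtain ⟨pre, suf, hl, hlen, -⟩ := (PySem.List.index?_eq_some_iff l v i).mp hio
      refine ⟨i, rfl, ?_⟩
      subst hl; simp [← hlen]

theorem pvKey_eq_of_not_mem {pr : List String} {c : String} (h : c ∉ pr) :
    pvKey pr c = (pr.length : Int) := by
  unfold pvKey; rw [if_neg h]

theorem pvKey_lt_of_mem {pr : List String} {c : String} (h : c ∈ pr) :
    pvKey pr c < (pr.length : Int) := by
  obtain ⟨i, hi, hlt⟩ := pvIndex_some h
  unfold pvKey; rw [if_pos h, hi]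
  simpa using hlt

theorem pvKey_le (pr : List String) (c : String) : pvKey pr c ≤ (pr.length : Int) := by
  by_cases h : c ∈ pr
  · exact le_of_lt (pvKey_lt_of_mem h)
  · exact le_of_eq (pvKey_eq_of_not_mem h)

theorem pvKey_inj {pr : List String} {a b : String} (ha : a ∈ pr) (hb : b ∈ pr)
    (h : pvKey pr a = pvKey pr b) : a = b := by
  obtain ⟨ia, hia, -⟩ := pvIndex_some ha
  obtain ⟨ib, hib, -⟩ := pvIndex_some hb
  unfold pvKey at h
  rw [if_pos ha, if_pos hb, hia, hib] at h
  have hii : ia = ib := by exact_mod_cast h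
  obtain ⟨hka, hga, -⟩ := PySem.List.getElem_of_index?_eq_some hia
  obtain ⟨hkb, hgb, -⟩ := PySem.List.getElem_of_index?_eq_some hib
  subst hii
  rw [← hga, ← hgb]

-- first occurrence of a prefix element lies inside the prefix
theorem pvKey_prefix_lt {s : List String} (t : List String) {a : String} (h : a ∈ s) :
    pvKey (s ++ t) a < (s.length : Int) := by
  obtain ⟨i, hi, hlt⟩ := pvIndex_some h
  have h2 : PySem.List.index? (s ++ t) a = some i := by
    rw [PySem.List.index?_append_of_mem t h]; exact hi
  unfold pvKey
  rw [if_pos (List.mem_append.mpr (Or.inl h)), h2]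
  simpa using hlt

-- first occurrence of a non-prefix element lies at or beyond the prefix
theorem pvKey_prefix_ge {s : List String} (t : List String) {c : String}
    (hns : c ∉ s) (hm : c ∈ s ++ t) : (s.length : Int) ≤ pvKey (s ++ t) c := by
  obtain ⟨i, hi, -⟩ := pvIndex_some hm
  unfold pvKey
  rw [if_pos hm, hi]
  simp only [Option.getD_some]
  by_contra hlt
  have hilt : i < s.length := by omega
  obtain ⟨hk, hget, -⟩ := PySem.List.getElem_of_index?_eq_some hi
  rw [List.getElem_append_left hilt] at hget
  exact hns (hget ▸ List.getElem_mem hilt)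

-- insertBy with everything in r strictly after x splits at the boundary
theorem pvInsertBy_append (before : String → String → Bool) (x : String) :
    ∀ (p r : List String), (∀ y ∈ r, before x y = true) →
      PySem.List.insertBy before x (p ++ r) = PySem.List.insertBy before x p ++ r := by
  intro p
  induction p with
  | nil =>
      intro r hr
      cases r with
      | nil => rfl
      | cons y t =>
          have : PySem.List.insertBy before x (y :: t)
              = if before x y then x :: y :: t else y :: PySem.List.insertBy before x t := rfl
          rw [List.nil_append, this, if_pos (hr y (by simp))]; rfl
  | cons a p ih =>
      intro r hr
      have h1 : PySem.List.insertBy before x (a :: (p ++ r))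
          = if before x a then x :: a :: (p ++ r) else a :: PySem.List.insertBy before x (p ++ r) := rfl
      have h2 : PySem.List.insertBy before x (a :: p)
          = if before x a then x :: a :: p else a :: PySem.List.insertBy before x p := rfl
      rw [List.cons_append, h1, h2]
      by_cases hb : before x a = true
      · rw [if_pos hb, if_pos hb]; rfl
      · rw [if_neg hb, if_neg hb, ih r hr]; rfl

theorem pvInsertBy_pairwise (k : String → Int) (x : String) :
    ∀ p : List String, p.Pairwise (fun a b => k a < k b) → (∀ y ∈ p, k x ≠ k y) →
      (PySem.List.insertBy (fun a b => decide (k a < k b)) x p).Pairwise (fun a b => k a < k b) := by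
  intro p
  induction p with
  | nil => intro _ _; simp [PySem.List.insertBy]
  | cons y p ih =>
      intro hpw hne
      have hd : PySem.List.insertBy (fun a b => decide (k a < k b)) x (y :: p)
          = if decide (k x < k y) then x :: y :: p
            else y :: PySem.List.insertBy (fun a b => decide (k a < k b)) x p := rfl
      rw [hd]
      rcases List.pairwise_cons.mp hpw with ⟨hy, hp⟩
      by_cases hlt : k x < k y
      · rw [if_pos (by simpa using hlt)]
        exact List.pairwise_cons.mpr ⟨by
          intro z hz
          rcases List.mem_cons.mp hz with rfl | hz
          · exact hlt
          · exact lt_trans hlt (hy z hz), hpw⟩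
      · rw [if_neg (by simpa using hlt)]
        have hxy : k y < k x := by
          have := hne y (by simp)
          omega
        refine List.pairwise_cons.mpr ⟨?_, ih hp (fun z hz => hne z (by simp [hz]))⟩
        intro z hz
        rcases (PySem.List.mem_insertBy _ x z p).mp hz with rfl | hz
        · exact hxy
        · exact hy z hz

theorem pvInsertBy_nodup (before : String → String → Bool) (x : String) :
    ∀ p : List String, x ∉ p → p.Nodup →
      (PySem.List.insertBy before x p).Nodup := by
  intro p
  induction p with
  | nil => intro _ _; simp [PySem.List.insertBy]
  | cons y p ih =>
      intro hx hnd
      have hd : PySem.List.insertBy before x (y :: p)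
          = if before x y then x :: y :: p
            else y :: PySem.List.insertBy before x p := rfl
      rw [hd]
      rcases List.nodup_cons.mp hnd with ⟨hyp, hp⟩
      by_cases hb : before x y = true
      · rw [if_pos hb]
        exact List.nodup_cons.mpr ⟨hx, hnd⟩
      · rw [if_neg hb]
        refine List.nodup_cons.mpr ⟨?_, ih (fun h => hx (by simp [h])) hp⟩
        intro hy
        rcases (PySem.List.mem_insertBy _ x y p).mp hy with rfl | hy
        · exact hx (by simp)
        · exact hyp hy

-- the "first occurrences not already in acc" list
def pvRest : List String → List String → List String
  | _, [] => []
  | acc, c :: t => if c ∈ acc then pvRest acc t else c :: pvRest (acc ++ [c]) t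

theorem pvRest_not_mem : ∀ (l acc : List String) (a : String), a ∈ pvRest acc l → a ∉ acc := by
  intro l
  induction l with
  | nil => intro acc a h; simp [pvRest] at h
  | cons c t ih =>
      intro acc a h
      by_cases hc : c ∈ acc
      · rw [pvRest, if_pos hc] at h
        exact ih acc a h
      · rw [pvRest, if_neg hc] at h
        rcases List.mem_cons.mp h with rfl | h
        · exact hc
        · intro ha
          exact ih (acc ++ [c]) a h (by simp [ha])

-- A's second loop
theorem pvFoldl2 : ∀ (l acc : List String),
    l.foldl (fun ordered column => if column ∉ ordered then ordered ++ [column] else ordered) acc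
      = acc ++ pvRest acc l := by
  intro l
  induction l with
  | nil => intro acc; simp [pvRest]
  | cons c t ih =>
      intro acc
      by_cases hc : c ∈ acc
      · rw [List.foldl_cons, if_neg (by simpa using hc), pvRest, if_pos hc]
        exact ih acc
      · rw [List.foldl_cons, if_pos (by simpa using hc), pvRest, if_neg hc, ih (acc ++ [c])]
        simp

theorem pvFoldlAdd : ∀ (l acc : List String),
    l.foldl PySem.Set.add acc = acc ++ pvRest acc l := by
  intro l
  induction l with
  | nil => intro acc; simp [pvRest]
  | cons c t ih =>
      intro acc
      by_cases hc : c ∈ acc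
      · rw [List.foldl_cons, PySem.Set.add_of_mem hc, pvRest, if_pos hc]
        exact ih acc
      · rw [List.foldl_cons, PySem.Set.add_of_not_mem hc, pvRest, if_neg hc, ih (acc ++ [c])]
        simp

theorem pvDedup_eq_pvRest (l : List String) : PySem.List.dedup l = pvRest [] l := by
  have h : PySem.List.dedup l = List.foldl PySem.Set.add ([] : List String) l := rfl
  rw [h, pvFoldlAdd]
  simp

theorem pvRest_filter : ∀ (l acc₁ acc₂ : List String), (∀ a ∈ acc₂, a ∈ acc₁) →
    pvRest acc₁ l = (pvRest acc₂ l).filter (fun a => decide (a ∉ acc₁)) := by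
  intro l
  induction l with
  | nil => intro _ _ _; simp [pvRest]
  | cons c t ih =>
      intro acc₁ acc₂ hsub
      by_cases h2 : c ∈ acc₂
      · rw [show pvRest acc₁ (c :: t) = pvRest acc₁ t from by rw [pvRest, if_pos (hsub c h2)],
            show pvRest acc₂ (c :: t) = pvRest acc₂ t from by rw [pvRest, if_pos h2]]
        exact ih acc₁ acc₂ hsub
      · rw [show pvRest acc₂ (c :: t) = c :: pvRest (acc₂ ++ [c]) t from by rw [pvRest, if_neg h2]]
        by_cases h1 : c ∈ acc₁
        · rw [show pvRest acc₁ (c :: t) = pvRest acc₁ t from by rw [pvRest, if_pos h1],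
              List.filter_cons_of_neg (by simpa using h1)]
          exact ih acc₁ (acc₂ ++ [c]) (by
            intro a ha
            rcases List.mem_append.mp ha with ha | ha
            · exact hsub a ha
            · simp at ha; subst ha; exact h1)
        · rw [show pvRest acc₁ (c :: t) = c :: pvRest (acc₁ ++ [c]) t from by rw [pvRest, if_neg h1],
              List.filter_cons_of_pos (by simpa using h1)]
          congr 1
          rw [ih (acc₁ ++ [c]) (acc₂ ++ [c]) (by
            intro a ha
            rcases List.mem_append.mp ha with ha | ha
            · exact List.mem_append.mpr (Or.inl (hsub a ha))
            · exact List.mem_append.mpr (Or.inr ha))]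
          apply List.filter_congr
          intro a ha
          have hne : a ≠ c := by
            have := pvRest_not_mem t (acc₂ ++ [c]) a ha
            intro h; exact this (by simp [h])
          simp [hne]

-- invariant of A's first loop: result = the available priority columns, in first-priority-index order
theorem pvLoop1 (av : List String) : ∀ (t s acc : List String),
    (∀ a, a ∈ acc ↔ (a ∈ s ∧ a ∈ av)) →
    acc.Pairwise (fun a b => pvKey (s ++ t) a < pvKey (s ++ t) b) →
    acc.Nodup →
    (∀ a, a ∈ (t.foldl (fun ordered column =>
        if column ∈ av ∧ column ∉ ordered then ordered ++ [column] else ordered) acc)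
       ↔ (a ∈ s ++ t ∧ a ∈ av)) ∧
    (t.foldl (fun ordered column =>
        if column ∈ av ∧ column ∉ ordered then ordered ++ [column] else ordered) acc).Pairwise
      (fun a b => pvKey (s ++ t) a < pvKey (s ++ t) b) ∧
    (t.foldl (fun ordered column =>
        if column ∈ av ∧ column ∉ ordered then ordered ++ [column] else ordered) acc).Nodup := by
  intro t
  induction t with
  | nil =>
      intro s acc hmem hpw hnd
      refine ⟨?_, by simpa using hpw, hnd⟩
      intro a
      simp only [List.foldl_nil]
      rw [hmem]
      simp
  | cons c t ih =>
      intro s acc hmem hpw hnd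
      have hre : s ++ c :: t = (s ++ [c]) ++ t := by simp
      rw [List.foldl_cons]
      by_cases hc : c ∈ av ∧ c ∉ acc
      · rw [if_pos hc]
        have hcs : c ∉ s := fun hs => hc.2 ((hmem c).mpr ⟨hs, hc.1⟩)
        have hmem' : ∀ a, a ∈ acc ++ [c] ↔ (a ∈ s ++ [c] ∧ a ∈ av) := by
          intro a
          constructor
          · intro ha
            rcases List.mem_append.mp ha with ha | ha
            · rcases (hmem a).mp ha with ⟨h1, h2⟩
              exact ⟨List.mem_append.mpr (Or.inl h1), h2⟩
            · simp at ha; subst ha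
              exact ⟨by simp, hc.1⟩
          · intro ⟨h1, h2⟩
            rcases List.mem_append.mp h1 with h1 | h1
            · exact List.mem_append.mpr (Or.inl ((hmem a).mpr ⟨h1, h2⟩))
            · simp at h1; subst h1; simp
        have hpw' : (acc ++ [c]).Pairwise
            (fun a b => pvKey ((s ++ [c]) ++ t) a < pvKey ((s ++ [c]) ++ t) b) := by
          rw [← hre]
          refine List.pairwise_append.mpr ⟨hpw, by simp, ?_⟩
          intro a ha b hb
          have hb' : b = c := by simpa using hb
          rw [hb']
          have has : a ∈ s := ((hmem a).mp ha).1
          calc pvKey (s ++ c :: t) a < (s.length : Int) := pvKey_prefix_lt (c :: t) has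
            _ ≤ pvKey (s ++ c :: t) c := pvKey_prefix_ge (c :: t) hcs (by simp)
        have hnd' : (acc ++ [c]).Nodup := by
          rw [List.nodup_append]
          refine ⟨hnd, List.nodup_singleton c, ?_⟩
          intro a ha b hb hab
          have hb' : b = c := by simpa using hb
          exact hc.2 ((hab.trans hb') ▸ ha)
        have := ih (s ++ [c]) (acc ++ [c]) hmem' hpw' hnd'
        rw [hre]
        exact this
      · rw [if_neg hc]
        have hmem' : ∀ a, a ∈ acc ↔ (a ∈ s ++ [c] ∧ a ∈ av) := by
          intro a
          constructor
          · intro ha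
            rcases (hmem a).mp ha with ⟨h1, h2⟩
            exact ⟨List.mem_append.mpr (Or.inl h1), h2⟩
          · intro ⟨h1, h2⟩
            rcases List.mem_append.mp h1 with h1 | h1
            · exact (hmem a).mpr ⟨h1, h2⟩
            · simp at h1; subst h1
              by_cases hacc : a ∈ acc
              · exact hacc
              · exact absurd ⟨h2, hacc⟩ hc
        have hpw' : acc.Pairwise
            (fun a b => pvKey ((s ++ [c]) ++ t) a < pvKey ((s ++ [c]) ++ t) b) := by
          rw [← hre]; exact hpw
        have := ih (s ++ [c]) acc hmem' hpw' hnd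
        rw [hre]
        exact this

-- invariant of B's insertion sort: priority part accumulates sorted in front, the rest appends in order
theorem pvMain (pr : List String) : ∀ (l p r : List String),
    l.Nodup → (∀ a ∈ l, a ∉ p ∧ a ∉ r) →
    (∀ a ∈ p, a ∈ pr) → p.Pairwise (fun a b => pvKey pr a < pvKey pr b) → p.Nodup →
    (∀ a ∈ r, a ∉ pr) →
    ∃ p', (l.foldl (fun acc x =>
            PySem.List.insertBy (fun a b => decide (pvKey pr a < pvKey pr b)) x acc) (p ++ r)
           = p' ++ r ++ l.filter (fun a => decide (a ∉ pr)))
      ∧ p'.Pairwise (fun a b => pvKey pr a < pvKey pr b) ∧ p'.Nodup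
      ∧ (∀ a, a ∈ p' ↔ (a ∈ p ∨ (a ∈ l ∧ a ∈ pr))) := by
  intro l
  induction l with
  | nil =>
      intro p r _ _ _ hpw hnd _
      exact ⟨p, by simp, hpw, hnd, by simp⟩
  | cons x t ih =>
      intro p r hnd hfresh hpmem hpw hpnd hrmem
      rcases List.nodup_cons.mp hnd with ⟨hxt, htnd⟩
      have hxp : x ∉ p := (hfresh x (by simp)).1
      have hxr : x ∉ r := (hfresh x (by simp)).2
      rw [List.foldl_cons]
      by_cases hx : x ∈ pr
      · -- x is a priority column: it is inserted inside the sorted front part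
        have hins : PySem.List.insertBy (fun a b => decide (pvKey pr a < pvKey pr b)) x (p ++ r)
            = PySem.List.insertBy (fun a b => decide (pvKey pr a < pvKey pr b)) x p ++ r := by
          apply pvInsertBy_append
          intro y hy
          have h1 : pvKey pr x < (pr.length : Int) := pvKey_lt_of_mem hx
          have h2 : pvKey pr y = (pr.length : Int) := pvKey_eq_of_not_mem (hrmem y hy)
          simp only [decide_eq_true_eq]
          omega
        rw [hins]
        set p₁ := PySem.List.insertBy (fun a b => decide (pvKey pr a < pvKey pr b)) x p with hp₁
        have hmem₁ : ∀ a, a ∈ p₁ ↔ (a = x ∨ a ∈ p) := fun a => PySem.List.mem_insertBy _ x a p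
        obtain ⟨p', heq, hpw', hnd', hmem'⟩ := ih p₁ r htnd
          (by
            intro a ha
            refine ⟨?_, (hfresh a (by simp [ha])).2⟩
            intro hap₁
            rcases (hmem₁ a).mp hap₁ with rfl | hap
            · exact hxt ha
            · exact (hfresh a (by simp [ha])).1 hap)
          (by
            intro a ha
            rcases (hmem₁ a).mp ha with rfl | hap
            · exact hx
            · exact hpmem a hap)
          (by
            apply pvInsertBy_pairwise
            · exact hpw
            · intro y hy hkey
              exact hxp ((pvKey_inj hx (hpmem y hy) hkey) ▸ hy))
          (pvInsertBy_nodup _ x p hxp hpnd)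
          hrmem
        refine ⟨p', ?_, hpw', hnd', ?_⟩
        · rw [heq, List.filter_cons_of_neg (by simpa using hx)]
        · intro a
          rw [hmem' a, hmem₁ a]
          constructor
          · rintro (⟨rfl | hap⟩ | ⟨hat, hapr⟩)
            · exact Or.inr ⟨by simp, hx⟩
            · exact Or.inl hap
            · exact Or.inr ⟨by simp [hat], hapr⟩
          · rintro (hap | ⟨hax, hapr⟩)
            · exact Or.inl (Or.inr hap)
            · rcases List.mem_cons.mp hax with rfl | hat
              · exact Or.inl (Or.inl rfl)
              · exact Or.inr ⟨hat, hapr⟩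
      · -- x is not a priority column: it goes to the very end
        have hins : PySem.List.insertBy (fun a b => decide (pvKey pr a < pvKey pr b)) x (p ++ r)
            = (p ++ r) ++ [x] := by
          apply PySem.List.insertBy_of_forall_not_before
          intro y hy
          have h1 : pvKey pr x = (pr.length : Int) := pvKey_eq_of_not_mem hx
          have h2 : pvKey pr y ≤ (pr.length : Int) := pvKey_le pr y
          simp only [decide_eq_false_iff_not]
          omega
        rw [hins, List.append_assoc]
        obtain ⟨p', heq, hpw', hnd', hmem'⟩ := ih p (r ++ [x]) htnd
          (by
            intro a ha
            refine ⟨(hfresh a (by simp [ha])).1, ?_⟩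
            intro har
            rcases List.mem_append.mp har with har | har
            · exact (hfresh a (by simp [ha])).2 har
            · simp at har; subst har; exact hxt ha)
          hpmem hpw hpnd
          (by
            intro a ha
            rcases List.mem_append.mp ha with ha | ha
            · exact hrmem a ha
            · simp at ha; subst ha; exact hx)
        refine ⟨p', ?_, hpw', hnd', ?_⟩
        · rw [heq, List.filter_cons_of_pos (by simpa using hx)]
          simp
        · intro a
          rw [hmem' a]
          constructor
          · rintro (hap | ⟨hat, hapr⟩)
            · exact Or.inl hap
            · exact Or.inr ⟨by simp [hat], hapr⟩
          · rintro (hap | ⟨hax, hapr⟩)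
            · exact Or.inl hap
            · rcases List.mem_cons.mp hax with rfl | hat
              · exact absurd hapr hx
              · exact Or.inr ⟨hat, hapr⟩

theorem pvMainEq (available_columns priority_columns : List String) (max_count : Int) :
    select_priority_columns available_columns priority_columns max_count
      = select_priority_columns_alt available_columns priority_columns max_count := by
  obtain ⟨hmem1, hpw1, hnd1⟩ :=
    pvLoop1 available_columns priority_columns [] [] (by simp) (by simp) (by simp)
  simp only [List.nil_append] at hmem1 hpw1
  obtain ⟨p', heq, hpw2, hnd2, hmem2⟩ :=
    pvMain priority_columns (PySem.List.dedup available_columns) [] []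
      (PySem.List.nodup_dedup available_columns) (by simp) (by simp) (by simp) (by simp) (by simp)
  simp only [List.append_nil] at heq hmem2
  -- the sorted front part is exactly A's first-loop output
  have hperm : (List.foldl (fun ordered column =>
      if column ∈ available_columns ∧ column ∉ ordered then ordered ++ [column] else ordered)
      [] priority_columns).Perm p' := by
    rw [List.perm_ext_iff_of_nodup hnd1 hnd2]
    intro a
    rw [hmem1 a, hmem2 a, PySem.List.mem_dedup]
    constructor
    · rintro ⟨h1, h2⟩
      exact Or.inr ⟨h2, h1⟩
    · rintro (h | ⟨h1, h2⟩)
      · simp at h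
      · exact ⟨h2, h1⟩
  have hO1p' : List.foldl (fun ordered column =>
      if column ∈ available_columns ∧ column ∉ ordered then ordered ++ [column] else ordered)
      [] priority_columns = p' :=
    hperm.eq_of_pairwise
      (fun a b _ _ h1 h2 => absurd h2 (by omega)) hpw1 hpw2
  -- A's second loop appends the remaining first occurrences: dedup minus the priority columns
  have hA2 : List.foldl
      (fun ordered column => if column ∉ ordered then ordered ++ [column] else ordered)
      (List.foldl (fun ordered column =>
        if column ∈ available_columns ∧ column ∉ ordered then ordered ++ [column] else ordered)
        [] priority_columns) available_columns
      = (List.foldl (fun ordered column =>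
          if column ∈ available_columns ∧ column ∉ ordered then ordered ++ [column] else ordered)
          [] priority_columns)
        ++ (PySem.List.dedup available_columns).filter
             (fun a => decide (a ∉ priority_columns)) := by
    rw [pvFoldl2, pvRest_filter available_columns _ [] (by simp), ← pvDedup_eq_pvRest]
    congr 1
    apply List.filter_congr
    intro a ha
    rw [PySem.List.mem_dedup] at ha
    have hiff : a ∈ List.foldl (fun ordered column =>
        if column ∈ available_columns ∧ column ∉ ordered then ordered ++ [column] else ordered)
        [] priority_columns ↔ a ∈ priority_columns := by
      rw [hmem1 a]
      exact ⟨fun h => h.1, fun h => ⟨h, ha⟩⟩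
    simp only [decide_eq_decide]
    exact not_congr hiff
  show PySem.List.slice (List.foldl
      (fun ordered column => if column ∉ ordered then ordered ++ [column] else ordered)
      (List.foldl (fun ordered column =>
        if column ∈ available_columns ∧ column ∉ ordered then ordered ++ [column] else ordered)
        [] priority_columns) available_columns) none (some max_count)
    = PySem.List.slice (PySem.List.sorted (PySem.List.dedup available_columns)
        (pvKey priority_columns)) none (some max_count)
  rw [hA2, hO1p', PySem.List.sorted_eq_foldl_insertBy, heq]

-- ===== VERDICT (by name: the statement is the Claim_ definition above) =====
theorem select_priority_columns_spec : Claim_equal_select_priority_columns := by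
  intro av pr mc _
  exact pvMainEq av pr mc
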